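-- pv_equiv track=rewrite | github.com/sun-hainan/Python | _worktree_backup/project_euler/problem_116/sol1.py | solution
-- ===== SOURCE A (Python) =====
-- def solution(length: int = 50) -> int:
--     """
--     Returns the number of different ways can the grey tiles in a row
--     of the given length be replaced if colours cannot be mixed
--     and at least one coloured tile must be used
--
--     >>> solution(5)
--     12
--     """
--
--     different_colour_ways_number = [[0] * 3 for _ in range(length + 1)]
--
--     for row_length in range(length + 1):
--     # 遍历循环
--         for tile_length in range(2, 5):
--             for tile_start in range(row_length - tile_length + 1):
--     # 遍历循环
--                 different_colour_ways_number[row_length][tile_length - 2] += (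
--                     different_colour_ways_number[row_length - tile_start - tile_length][
--                         tile_length - 2
--                     ]
--                     + 1
--                 )
--
--     return sum(different_colour_ways_number[length])
-- ===== SOURCE B (Python) =====
-- def solution(length: int = 50) -> int:
--     total = 0
--     for k in (2, 3, 4):
--         f = [0] * (length + 1)
--         for n in range(k, length + 1):
--             f[n] = f[n - 1] + f[n - k] + 1
--         total += f[length]
--     return total
-- ===== Notes on version B (the rewrite author's own statement) =====
-- stated objective: faster
-- what changed: Replaced the inner prefix-sum scan over all tile start positions with the standard linear recurrence (previous count plus the count k cells back plus one) per tile length, one linear pass per colour instead of a quadratic table fill.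
import Mathlib
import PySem

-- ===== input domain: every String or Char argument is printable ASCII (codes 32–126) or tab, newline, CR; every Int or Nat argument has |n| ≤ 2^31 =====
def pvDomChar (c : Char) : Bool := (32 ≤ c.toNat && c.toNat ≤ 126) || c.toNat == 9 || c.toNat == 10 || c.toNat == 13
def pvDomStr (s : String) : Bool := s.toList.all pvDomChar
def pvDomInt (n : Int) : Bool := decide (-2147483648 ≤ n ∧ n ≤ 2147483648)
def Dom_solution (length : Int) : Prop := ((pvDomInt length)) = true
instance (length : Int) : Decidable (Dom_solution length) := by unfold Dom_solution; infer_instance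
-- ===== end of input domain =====

-- B replaces A's quadratic prefix-sum table fill by a linear per-tile-length recurrence
-- (objective: faster; timing run measured the speed-up).

-- ===== PORT A =====
-- one `+=` step of A's innermost loop (row `n`, tile length `k`, start `s`)
def stepA (n k : Nat) (tb : List (List Int)) (s : Nat) : List (List Int) :=
  tb.set n ((tb.getD n []).set (k - 2)
    ((tb.getD n []).getD (k - 2) 0 + ((tb.getD (n - s - k) []).getD (k - 2) 0 + 1)))

-- A's loop `for tile_start in range(row_length - tile_length + 1)`
def colA (tb : List (List Int)) (n k : Nat) : List (List Int) :=
  (List.range (n + 1 - k)).foldl (stepA n k) tb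

-- A's loop `for tile_length in range(2, 5)`
def rowA (tb : List (List Int)) (n : Nat) : List (List Int) :=
  (List.range' 2 3).foldl (fun tb k => colA tb n k) tb

def solution (length : Int) : Int :=
  let L := length.toNat
  let init : List (List Int) := List.replicate (L + 1) (List.replicate 3 0)
  let final := (List.range (L + 1)).foldl rowA init
  (final.getD L []).sum

-- ===== PORT B =====
def solution_alt (length : Int) : Int :=
  let L := length.toNat
  ([2, 3, 4] : List Nat).foldl (fun total k =>
    let f0 : List Int := List.replicate (L + 1) 0
    let f := (List.range' k (L + 1 - k)).foldl
      (fun f n => f.set n (f.getD (n - 1) 0 + f.getD (n - k) 0 + 1)) f0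
    total + f.getD L 0) 0

-- ===== PRECONDITION & SPEC =====
-- A raises IndexError for negative length (indexing the empty table with a negative index)
def Pre_solution (length : Int) : Prop := 0 ≤ length
instance (length : Int) : Decidable (Pre_solution length) := by unfold Pre_solution; infer_instance
def pvWitness_solution : Int := 5
def Spec_solution (length : Int) (out : Int) : Prop := out = solution_alt length
instance (length : Int) (out : Int) : Decidable (Spec_solution length out) := by unfold Spec_solution; infer_instance

-- ===== CLAIM (what is proved, stated in full; the proofs are below) =====
def Claim_equal_solution : Prop := ∀ (length : Int), Dom_solution length → Pre_solution length → Spec_solution length (solution length)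

-- ===== LEMMAS AND PROOFS =====

-- the mathematical count for one tile length k
def fRec (k : Nat) (n : Nat) : Int :=
  if h : k = 0 ∨ n < k then 0
  else fRec k (n - 1) + fRec k (n - k) + 1
termination_by n
decreasing_by all_goals omega

theorem fRec_lt {k n : Nat} (h : n < k) : fRec k n = 0 := by
  rw [fRec]; simp [h]

theorem fRec_ge {k n : Nat} (hk : k ≠ 0) (h : k ≤ n) :
    fRec k n = fRec k (n - 1) + fRec k (n - k) + 1 := by
  rw [fRec]; simp [hk, Nat.not_lt.mpr h]

-- A's row value is the running prefix sum: fRec k n = Σ_{m<n+1-k} fRec k m + (n+1-k)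
theorem fRec_sum (k : Nat) (hk : 2 ≤ k) (n : Nat) :
    fRec k n = (∑ m ∈ Finset.range (n + 1 - k), fRec k m) + (n + 1 - k : Nat) := by
  induction n with
  | zero =>
    rw [fRec_lt (by omega)]
    have h0 : 1 - k = 0 := by omega
    simp [h0]
  | succ n ih =>
    rcases Nat.lt_or_ge (n + 1) k with h | h
    · rw [fRec_lt h]
      have : n + 1 + 1 - k = 0 := by omega
      simp [this]
    · rw [fRec_ge (by omega) h]
      rcases Nat.eq_or_lt_of_le h with h' | h'
      · have h0 : n + 1 - k = 0 := by omega
        have h1 : n + 1 + 1 - k = 1 := by omega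
        have h2 : n + 1 - 1 = n := by omega
        have z0 : fRec k 0 = 0 := fRec_lt (by omega)
        have zn : fRec k n = 0 := fRec_lt (by omega)
        rw [h1, h2, zn, h0]
        simp [z0]
      · have h2 : n + 1 - 1 = n := by omega
        rw [h2, ih]
        have h3 : n + 1 + 1 - k = (n + 1 - k) + 1 := by omega
        rw [h3, Finset.sum_range_succ]
        push_cast
        ring

-- ---- B side ----

theorem b_inv (k L : Nat) (hk : 2 ≤ k) (c : Nat) (hc : c ≤ L + 1 - k) :
    let f := (List.range' k c).foldl
      (fun f n => f.set n (f.getD (n - 1) 0 + f.getD (n - k) 0 + 1))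
      (List.replicate (L + 1) (0 : Int))
    f.length = L + 1 ∧ ∀ i, i ≤ L → f.getD i 0 = if i < k + c then fRec k i else 0 := by
  induction c with
  | zero =>
    refine ⟨by simp, fun i hi => ?_⟩
    simp only [List.range'_zero, List.foldl_nil]
    rw [List.getD_replicate _ (by omega)]
    split
    · exact (fRec_lt (by omega)).symm
    · rfl
  | succ c ih =>
    have ih' := ih (by omega)
    obtain ⟨hlen, hval⟩ := ih'
    rw [List.range'_concat]
    simp only [List.foldl_append, List.foldl_cons, List.foldl_nil]
    set f := (List.range' k c).foldl
      (fun f n => f.set n (f.getD (n - 1) 0 + f.getD (n - k) 0 + 1))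
      (List.replicate (L + 1) (0 : Int)) with hf
    have hkc : k + c ≤ L := by omega
    have hkclen : k + 1 * c < f.length := by rw [hlen]; omega
    constructor
    · simp [List.length_set, hlen]
    · intro i hi
      by_cases hik : i = k + 1 * c
      · subst hik
        rw [List.getD_eq_getElem?_getD, List.getElem?_set_self hkclen, Option.getD_some]
        have e1 : fRec k (k + 1 * c - 1) = f.getD (k + 1 * c - 1) 0 := by
          rw [hval _ (by omega)]; rw [if_pos (by omega)]
        have e2 : fRec k (k + 1 * c - k) = f.getD (k + 1 * c - k) 0 := by
          rw [hval _ (by omega)]; rw [if_pos (by omega)]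
        rw [if_pos (by omega : k + 1 * c < k + (c + 1))]
        rw [fRec_ge (by omega) (by omega), e1, e2]
      · rw [List.getD_eq_getElem?_getD, List.getElem?_set_ne (fun h => hik h.symm),
          ← List.getD_eq_getElem?_getD, hval i hi]
        have hc' : (i < k + c) = (i < k + (c + 1)) := by
          apply propext; constructor <;> intro <;> omega
        simp only [hc']

theorem b_value (L k : Nat) (hk : 2 ≤ k) :
    ((List.range' k (L + 1 - k)).foldl
      (fun f n => f.set n (f.getD (n - 1) 0 + f.getD (n - k) 0 + 1))
      (List.replicate (L + 1) (0 : Int))).getD L 0 = fRec k L := by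
  obtain ⟨_, hval⟩ := b_inv k L hk (L + 1 - k) le_rfl
  rw [hval L le_rfl, if_pos (by omega)]

theorem solution_alt_eq (length : Int) :
    solution_alt length = fRec 2 length.toNat + fRec 3 length.toNat + fRec 4 length.toNat := by
  show (0 : Int) + _ + _ + _ = _
  rw [b_value length.toNat 2 (by omega), b_value length.toNat 3 (by omega),
    b_value length.toNat 4 (by omega)]
  ring

-- ---- A side ----

-- the inner loop adds the prefix sum to entry (n, k-2) and touches nothing else
theorem stepA_fold (n k L : Nat) (hk : 2 ≤ k) (hk3 : k ≤ 4)
    (m : Nat) (tb : List (List Int))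
    (hlen : tb.length = L + 1) (hn : n ≤ L) (hrow : (tb.getD n []).length = 3)
    (hm : ∀ s, s < m → n - s - k < n) :
    let T := (List.range m).foldl (stepA n k) tb
    T.length = L + 1 ∧ (∀ m', m' ≠ n → T.getD m' [] = tb.getD m' []) ∧
    (T.getD n []).length = 3 ∧
    (∀ j, j ≠ k - 2 → (T.getD n []).getD j 0 = (tb.getD n []).getD j 0) ∧
    (T.getD n []).getD (k - 2) 0 = (tb.getD n []).getD (k - 2) 0 +
      ∑ s ∈ Finset.range m, ((tb.getD (n - s - k) []).getD (k - 2) 0 + 1) := by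
  induction m with
  | zero => exact ⟨hlen, fun _ _ => rfl, hrow, fun _ _ => rfl, by simp⟩
  | succ m ih =>
    have ih' := ih (fun s hs => hm s (by omega))
    obtain ⟨ilen, iother, irow, icol, ival⟩ := ih'
    rw [List.range_succ]
    simp only [List.foldl_append, List.foldl_cons, List.foldl_nil]
    set T := (List.range m).foldl (stepA n k) tb with hT
    have hnlen : n < T.length := by omega
    have hjlen : k - 2 < (T.getD n []).length := by omega
    have hread : n - m - k ≠ n := by have := hm m (by omega); omega
    have getn : (T.set n ((T.getD n []).set (k - 2)
        ((T.getD n []).getD (k - 2) 0 + ((T.getD (n - m - k) []).getD (k - 2) 0 + 1)))).getD n []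
        = (T.getD n []).set (k - 2)
        ((T.getD n []).getD (k - 2) 0 + ((T.getD (n - m - k) []).getD (k - 2) 0 + 1)) := by
      rw [List.getD_eq_getElem?_getD, List.getElem?_set_self hnlen, Option.getD_some]
    refine ⟨?_, ?_, ?_, ?_, ?_⟩
    · simp only [stepA, List.length_set]; omega
    · intro m' hm'
      simp only [stepA]
      rw [List.getD_eq_getElem?_getD, List.getElem?_set_ne (fun h => hm' h.symm),
        ← List.getD_eq_getElem?_getD]
      exact iother m' hm'
    · simp only [stepA, getn, List.length_set]; omega
    · intro j hj
      simp only [stepA, getn]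
      rw [List.getD_eq_getElem?_getD, List.getElem?_set_ne (fun h => hj h.symm),
        ← List.getD_eq_getElem?_getD]
      exact icol j hj
    · simp only [stepA, getn]
      rw [List.getD_eq_getElem?_getD, List.getElem?_set_self hjlen, Option.getD_some]
      rw [ival, iother _ hread, Finset.sum_range_succ]
      ring

-- one column pass computes fRec k n in entry (n, k-2), other entries untouched
theorem colA_spec (tb : List (List Int)) (L n k : Nat) (hk : 2 ≤ k) (hk3 : k ≤ 4)
    (hlen : tb.length = L + 1) (hn : n ≤ L) (hrow : (tb.getD n []).length = 3)
    (hread : ∀ m, m < n → (tb.getD m []).getD (k - 2) 0 = fRec k m)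
    (h0 : (tb.getD n []).getD (k - 2) 0 = 0) :
    let T := colA tb n k
    T.length = L + 1 ∧ (∀ m', m' ≠ n → T.getD m' [] = tb.getD m' []) ∧
    (T.getD n []).length = 3 ∧
    (∀ j, j ≠ k - 2 → (T.getD n []).getD j 0 = (tb.getD n []).getD j 0) ∧
    (T.getD n []).getD (k - 2) 0 = fRec k n := by
  simp only [colA]
  have hm : ∀ s, s < n + 1 - k → n - s - k < n := by intro s hs; omega
  obtain ⟨a, b, c, d, e⟩ := stepA_fold n k L hk hk3 (n + 1 - k) tb hlen hn hrow hm
  refine ⟨a, b, c, d, ?_⟩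
  rw [e, h0, zero_add]
  have : ∀ s ∈ Finset.range (n + 1 - k),
      (tb.getD (n - s - k) []).getD (k - 2) 0 + 1 = fRec k (n - s - k) + 1 := by
    intro s hs
    rw [hread (n - s - k) (hm s (Finset.mem_range.mp hs))]
  rw [Finset.sum_congr rfl this, fRec_sum k hk n, Finset.sum_add_distrib]
  have : ∀ s ∈ Finset.range (n + 1 - k), fRec k (n - s - k) = fRec k (n + 1 - k - 1 - s) := by
    intro s hs
    rw [Finset.mem_range] at hs
    congr 1
    omega
  rw [Finset.sum_congr rfl this, Finset.sum_range_reflect (fun j => fRec k j) (n + 1 - k)]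
  simp

-- invariant across rows
def TblInv (tb : List (List Int)) (L r : Nat) : Prop :=
  tb.length = L + 1 ∧ (∀ m, m ≤ L → (tb.getD m []).length = 3) ∧
  (∀ m, m ≤ L → ∀ j, j < 3 → (tb.getD m []).getD j 0 = if m < r then fRec (j + 2) m else 0)

theorem rowA_step (tb : List (List Int)) (L r : Nat) (h : TblInv tb L r) (hr : r ≤ L) :
    TblInv (rowA tb r) L (r + 1) := by
  obtain ⟨hlen, hrows, hvals⟩ := h
  have hrange : List.range' 2 3 = [2, 3, 4] := by decide
  rw [rowA, hrange]
  simp only [List.foldl_cons, List.foldl_nil]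
  -- k = 2 pass
  obtain ⟨l2, o2, r2, c2, v2⟩ := colA_spec tb L r 2 (by omega) (by omega) hlen hr
    (hrows r hr)
    (fun m hm => by rw [hvals m (by omega) 0 (by omega), if_pos hm])
    (by rw [hvals r hr 0 (by omega), if_neg (by omega)])
  set T2 := colA tb r 2 with hT2
  -- k = 3 pass
  obtain ⟨l3, o3, r3, c3, v3⟩ := colA_spec T2 L r 3 (by omega) (by omega) l2 hr r2
    (fun m hm => by
      rw [o2 m (by omega), hvals m (by omega) 1 (by omega), if_pos hm])
    (by rw [c2 1 (by omega), hvals r hr 1 (by omega), if_neg (by omega)])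
  set T3 := colA T2 r 3 with hT3
  -- k = 4 pass
  obtain ⟨l4, o4, r4, c4, v4⟩ := colA_spec T3 L r 4 (by omega) (by omega) l3 hr r3
    (fun m hm => by
      rw [o3 m (by omega), o2 m (by omega), hvals m (by omega) 2 (by omega), if_pos hm])
    (by rw [c3 2 (by omega), c2 2 (by omega), hvals r hr 2 (by omega), if_neg (by omega)])
  refine ⟨l4, ?_, ?_⟩
  · intro m hm
    by_cases hmr : m = r
    · subst hmr; exact r4
    · rw [o4 m hmr, o3 m hmr, o2 m hmr]; exact hrows m hm
  · intro m hm j hj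
    by_cases hmr : m = r
    · subst hmr
      rw [if_pos (by omega)]
      interval_cases j
      · rw [c4 0 (by omega), c3 0 (by omega)]; exact v2
      · rw [c4 1 (by omega)]; exact v3
      · exact v4
    · rw [o4 m hmr, o3 m hmr, o2 m hmr, hvals m hm j hj]
      have hmr' : (m < r) = (m < r + 1) := by
        apply propext; constructor <;> intro <;> omega
      simp only [hmr']

theorem a_table (L : Nat) (r : Nat) (hr : r ≤ L + 1) :
    TblInv ((List.range r).foldl rowA (List.replicate (L + 1) (List.replicate 3 0))) L r := by
  induction r with
  | zero =>
    refine ⟨by simp, fun m hm => ?_, fun m hm j hj => ?_⟩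
    · simp only [List.range_zero, List.foldl_nil]
      rw [List.getD_replicate _ (by omega)]
      simp
    · simp only [List.range_zero, List.foldl_nil]
      rw [List.getD_replicate _ (by omega), List.getD_replicate _ (by omega)]
      simp
  | succ r ih =>
    rw [List.range_succ]
    simp only [List.foldl_append, List.foldl_cons, List.foldl_nil]
    exact rowA_step _ L r (ih (by omega)) (by omega)

theorem solution_eq (length : Int) :
    solution length = fRec 2 length.toNat + fRec 3 length.toNat + fRec 4 length.toNat := by
  set L := length.toNat with hL
  obtain ⟨hlen, hrows, hvals⟩ := a_table L (L + 1) le_rfl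
  show (((List.range (L + 1)).foldl rowA (List.replicate (L + 1) (List.replicate 3 0))).getD L []).sum = _
  set row := ((List.range (L + 1)).foldl rowA (List.replicate (L + 1) (List.replicate 3 0))).getD L []
    with hrowdef
  have hl3 : row.length = 3 := hrows L le_rfl
  have h0 : row.getD 0 0 = fRec 2 L := by rw [hvals L le_rfl 0 (by omega), if_pos (by omega)]
  have h1 : row.getD 1 0 = fRec 3 L := by rw [hvals L le_rfl 1 (by omega), if_pos (by omega)]
  have h2 : row.getD 2 0 = fRec 4 L := by rw [hvals L le_rfl 2 (by omega), if_pos (by omega)]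
  match row, hl3 with
  | [a, b, c], _ =>
    simp only [List.getD_eq_getElem?_getD] at h0 h1 h2
    simp at h0 h1 h2
    simp only [List.sum_cons, List.sum_nil, h0, h1, h2]
    ring

-- ===== VERDICT (by name: the statement is the Claim_ definition above) =====
theorem solution_spec : Claim_equal_solution := by
  intro length _ _
  unfold Spec_solution
  rw [solution_eq, solution_alt_eq]
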